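-- pv_equiv track=rewrite | github.com/mhoff73/Python | obamicon.py | create_new_image_data
-- ===== SOURCE A (Python) =====
-- dark_blue = (0, 51, 76)
--
-- red = (217, 26, 33)
--
-- light_blue = (112, 150, 158)
--
-- yellow = (252, 227, 166)
--
-- def create_new_image_data(image_data):
--
-- 	new_pic = []
--
-- 	#goes through the RGB values of each pixel in the image
-- 	for pixel in image_data:
-- 		red_val = pixel[0]
-- 		green_val = pixel[1]
-- 		blue_val = pixel[2]
--
-- 		intensity = red_val + green_val + blue_val
--
-- 		if intensity < 182:
-- 			new_pic.append(dark_blue)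
-- 		elif intensity < 364:
-- 			new_pic.append(red)
-- 		elif intensity < 546:
-- 			new_pic.append(light_blue)
-- 		else:
-- 			new_pic.append(yellow)
--
-- 	return new_pic
-- ===== SOURCE B (Python) =====
-- dark_blue = (0, 51, 76)
-- red = (217, 26, 33)
-- light_blue = (112, 150, 158)
-- yellow = (252, 227, 166)
--
-- _THRESHOLDS = [182, 364, 546]
-- _COLORS = [dark_blue, red, light_blue, yellow]
--
-- def _bisect(arr, x):
--     # insertion point of x in sorted arr (rightmost), binary search
--     lo, hi = 0, len(arr)
--     while lo < hi:
--         mid = (lo + hi) // 2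
--         if x < arr[mid]:
--             hi = mid
--         else:
--             lo = mid + 1
--     return lo
--
-- def create_new_image_data(image_data):
--     return [_COLORS[_bisect(_THRESHOLDS, p[0] + p[1] + p[2])] for p in image_data]
-- ===== Notes on version B (the rewrite author's own statement) =====
-- stated objective: alternative
-- what changed: Replaces the if/elif threshold cascade with a hand-written binary search over a threshold table indexing a parallel color table, built as a single list comprehension instead of append-in-a-loop.
import Mathlib
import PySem

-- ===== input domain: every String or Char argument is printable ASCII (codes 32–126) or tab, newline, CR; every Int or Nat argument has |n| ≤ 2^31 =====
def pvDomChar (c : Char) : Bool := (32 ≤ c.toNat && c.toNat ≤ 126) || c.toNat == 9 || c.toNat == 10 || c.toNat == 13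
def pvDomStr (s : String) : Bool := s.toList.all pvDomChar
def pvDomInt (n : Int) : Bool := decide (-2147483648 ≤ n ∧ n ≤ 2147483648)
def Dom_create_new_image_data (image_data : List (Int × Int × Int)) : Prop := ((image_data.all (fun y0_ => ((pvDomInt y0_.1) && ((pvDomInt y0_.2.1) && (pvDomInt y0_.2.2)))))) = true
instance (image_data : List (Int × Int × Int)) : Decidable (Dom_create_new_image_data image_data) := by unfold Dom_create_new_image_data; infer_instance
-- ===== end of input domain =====

-- B replaces A's if/elif threshold cascade by a hand-written binary search over a threshold
-- table indexing a parallel color table (alternative decomposition; same asymptotic cost).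

-- ===== PORT A =====
def create_new_image_data (image_data : List (Int × Int × Int)) : List (Int × Int × Int) :=
  image_data.foldl (fun new_pic pixel =>
    let red_val := pixel.1
    let green_val := pixel.2.1
    let blue_val := pixel.2.2
    let intensity := red_val + green_val + blue_val
    if intensity < 182 then new_pic ++ [((0 : Int), (51 : Int), (76 : Int))]
    else if intensity < 364 then new_pic ++ [((217 : Int), (26 : Int), (33 : Int))]
    else if intensity < 546 then new_pic ++ [((112 : Int), (150 : Int), (158 : Int))]
    else new_pic ++ [((252 : Int), (227 : Int), (166 : Int))]) []

-- ===== PORT B =====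
-- hand-written binary search from Source B, ported step for step (lo/hi loop as recursion on hi - lo)
def pvBisect (arr : List Int) (x : Int) (lo hi : Nat) : Nat :=
  if lo < hi then
    let mid := (lo + hi) / 2
    if x < arr.getD mid 0 then pvBisect arr x lo mid
    else pvBisect arr x (mid + 1) hi
  else lo
termination_by hi - lo
decreasing_by all_goals omega

def pvThresholds : List Int := [182, 364, 546]
def pvColors : List (Int × Int × Int) := [(0, 51, 76), (217, 26, 33), (112, 150, 158), (252, 227, 166)]

def create_new_image_data_alt (image_data : List (Int × Int × Int)) : List (Int × Int × Int) :=
  image_data.map (fun p => pvColors.getD (pvBisect pvThresholds (p.1 + p.2.1 + p.2.2) 0 pvThresholds.length) (0, 0, 0))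

-- ===== PRECONDITION & SPEC =====
def Spec_create_new_image_data (image_data : List (Int × Int × Int)) (out : List (Int × Int × Int)) : Prop := out = create_new_image_data_alt image_data
instance (image_data : List (Int × Int × Int)) (out : List (Int × Int × Int)) : Decidable (Spec_create_new_image_data image_data out) := by unfold Spec_create_new_image_data; infer_instance

-- ===== CLAIM (what is proved, stated in full; the proofs are below) =====
def Claim_equal_create_new_image_data : Prop := ∀ (image_data : List (Int × Int × Int)), Dom_create_new_image_data image_data → Spec_create_new_image_data image_data (create_new_image_data image_data)

-- ===== LEMMAS AND PROOFS =====

lemma pvBisect_eval (x : Int) :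
    pvBisect pvThresholds x 0 3 =
      if x < 182 then 0 else if x < 364 then 1 else if x < 546 then 2 else 3 := by
  unfold pvBisect
  simp only [pvThresholds]
  norm_num
  split_ifs <;> (unfold pvBisect; norm_num; try (unfold pvBisect)) <;> split_ifs <;> omega

-- ===== VERDICT (by name: the statement is the Claim_ definition above) =====
theorem create_new_image_data_spec : Claim_equal_create_new_image_data := by
  intro l _
  show create_new_image_data l = create_new_image_data_alt l
  unfold create_new_image_data create_new_image_data_alt
  have hbody : (fun (new_pic : List (Int × Int × Int)) (pixel : Int × Int × Int) =>
      let red_val := pixel.1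
      let green_val := pixel.2.1
      let blue_val := pixel.2.2
      let intensity := red_val + green_val + blue_val
      if intensity < 182 then new_pic ++ [((0 : Int), (51 : Int), (76 : Int))]
      else if intensity < 364 then new_pic ++ [((217 : Int), (26 : Int), (33 : Int))]
      else if intensity < 546 then new_pic ++ [((112 : Int), (150 : Int), (158 : Int))]
      else new_pic ++ [((252 : Int), (227 : Int), (166 : Int))]) =
      (fun new_pic pixel => new_pic ++
        [pvColors.getD (pvBisect pvThresholds (pixel.1 + pixel.2.1 + pixel.2.2) 0 pvThresholds.length) (0, 0, 0)]) := by
    funext acc p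
    rw [show pvThresholds.length = 3 from rfl, pvBisect_eval (p.1 + p.2.1 + p.2.2)]
    simp only []
    split_ifs <;> simp [pvColors]
  rw [hbody, PySem.List.foldl_append_singleton_eq_map]
  simp
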